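-- pv_equiv track=rewrite | github.com/mcwdsi/bam2tensor | tests/test_filters.py | _query_for_ref_with_cpg_bases
-- ===== SOURCE A (Python) =====
-- def _query_for_ref_with_cpg_bases(ref_seq: str, cpg_base_for_c: str) -> str:
--     """Build a query sequence: N→A, C in CpG→cpg_base_for_c, G→G (match)."""
--     out = []
--     i = 0
--     while i < len(ref_seq):
--         c = ref_seq[i]
--         if c == "C" and i + 1 < len(ref_seq) and ref_seq[i + 1] == "G":
--             out.append(cpg_base_for_c)
--             out.append("G")
--             i += 2
--         elif c == "N":
--             out.append("A")
--             i += 1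
--         else:
--             out.append(c)
--             i += 1
--     return "".join(out)
-- ===== SOURCE B (Python) =====
-- def _query_for_ref_with_cpg_bases(ref_seq: str, cpg_base_for_c: str) -> str:
--     """Build a query sequence: N->A, C in CpG->cpg_base_for_c, G->G (match)."""
--     # Split on non-overlapping "CG" sites, fix N->A inside the CG-free pieces,
--     # and rejoin with the replacement for each CpG site.
--     return (cpg_base_for_c + "G").join(
--         piece.replace("N", "A") for piece in ref_seq.split("CG")
--     )
-- ===== Notes on version B (the rewrite author's own statement) =====
-- stated objective: faster
-- what changed: Replaces the manual index/lookahead while-loop (appending piece by piece with i += 2 stride handling) by a single declarative split-on-'CG' / replace-'N'-by-'A' / rejoin-with-replacement pipeline built from str.split, str.replace and str.join.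
import Mathlib
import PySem

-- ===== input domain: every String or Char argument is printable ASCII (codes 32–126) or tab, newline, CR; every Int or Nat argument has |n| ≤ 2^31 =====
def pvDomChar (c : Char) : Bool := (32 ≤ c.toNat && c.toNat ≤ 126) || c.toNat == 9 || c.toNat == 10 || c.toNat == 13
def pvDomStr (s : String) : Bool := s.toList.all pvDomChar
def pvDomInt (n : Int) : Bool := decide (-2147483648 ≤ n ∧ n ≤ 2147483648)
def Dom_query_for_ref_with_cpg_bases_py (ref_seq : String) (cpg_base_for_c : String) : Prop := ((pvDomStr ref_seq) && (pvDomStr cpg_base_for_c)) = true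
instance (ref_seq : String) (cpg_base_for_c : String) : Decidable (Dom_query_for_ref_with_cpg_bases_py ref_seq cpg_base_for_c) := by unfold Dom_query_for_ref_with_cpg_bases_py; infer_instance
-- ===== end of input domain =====

-- B replaces A's manual index/lookahead scan by one split-on-"CG" / fix-N / rejoin pass
-- (objective: faster by a constant factor — C-level str primitives replace the Python-level
-- char loop, measured; same observable behaviour, proved below).

-- ===== PORT A =====
-- A's while loop over index i with lookahead ref_seq[i+1], transcribed as the obvious
-- recursion over the remaining characters (same state: the yet-unread suffix, same
-- branch order: CpG test, then 'N', then default).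
def pvALoop (cpg : List Char) : List Char → List Char
  | [] => []
  | c :: rest =>
    if c = 'C' ∧ rest.head? = some 'G' then
      cpg ++ 'G' :: pvALoop cpg rest.tail      -- out += [cpg_base_for_c, "G"]; i += 2
    else if c = 'N' then 'A' :: pvALoop cpg rest
    else c :: pvALoop cpg rest
  termination_by l => l.length
  decreasing_by all_goals (simp [List.length_tail]; try omega)

def query_for_ref_with_cpg_bases_py (ref_seq : String) (cpg_base_for_c : String) : String :=
  String.ofList (pvALoop cpg_base_for_c.toList ref_seq.toList)

-- ===== PORT B =====
-- Source B: (cpg_base_for_c + "G").join(p.replace("N", "A") for p in ref_seq.split("CG"))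
-- str.split / str.replace / str.join are ported by their PySem.Chars counterparts
-- (exact Python semantics on List Char; the separator "CG" is non-empty, split's total case).
def query_for_ref_with_cpg_bases_py_alt (ref_seq : String) (cpg_base_for_c : String) : String :=
  String.ofList (PySem.Chars.join (cpg_base_for_c.toList ++ ['G'])
    ((PySem.Chars.splitOn ref_seq.toList ['C', 'G']).map (fun p => PySem.Chars.replace p ['N'] ['A'])))

-- ===== PRECONDITION & SPEC =====
def Spec_query_for_ref_with_cpg_bases_py (ref_seq : String) (cpg_base_for_c : String) (out : String) : Prop := out = query_for_ref_with_cpg_bases_py_alt ref_seq cpg_base_for_c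
instance (ref_seq : String) (cpg_base_for_c : String) (out : String) : Decidable (Spec_query_for_ref_with_cpg_bases_py ref_seq cpg_base_for_c out) := by unfold Spec_query_for_ref_with_cpg_bases_py; infer_instance

-- ===== CLAIM (what is proved, stated in full; the proofs are below) =====
def Claim_equal_query_for_ref_with_cpg_bases_py : Prop := ∀ (ref_seq : String) (cpg_base_for_c : String), Dom_query_for_ref_with_cpg_bases_py ref_seq cpg_base_for_c → Spec_query_for_ref_with_cpg_bases_py ref_seq cpg_base_for_c (query_for_ref_with_cpg_bases_py ref_seq cpg_base_for_c)

-- ===== LEMMAS AND PROOFS =====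

-- Specification-side split of a char list at non-overlapping leftmost "CG" sites.
def pvSplitCG : List Char → List (List Char)
  | [] => [[]]
  | c :: rest =>
    if c = 'C' ∧ rest.head? = some 'G' then [] :: pvSplitCG rest.tail
    else
      match pvSplitCG rest with
      | p :: ps => (c :: p) :: ps
      | [] => [[c]]
  termination_by l => l.length
  decreasing_by all_goals (simp [List.length_tail]; try omega)

def pvSubNA (c : Char) : Char := if c = 'N' then 'A' else c

def pvHeadCons (pre : List Char) : List (List Char) → List (List Char)
  | p :: ps => (pre ++ p) :: ps
  | [] => [pre]

lemma pvSplitCG_ne_nil (l : List Char) : pvSplitCG l ≠ [] := by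
  cases l with
  | nil => simp [pvSplitCG]
  | cons c rest =>
    rw [pvSplitCG]
    split
    · simp
    · cases h : pvSplitCG rest <;> simp

lemma replace_go_spec : ∀ fuel (l acc : List Char), l.length ≤ fuel →
    PySem.Chars.replace.go ['N'] ['A'] fuel l acc = acc.reverse ++ l.map pvSubNA := by
  intro fuel
  induction fuel with
  | zero => intro l acc h; simp at h; simp [h, PySem.Chars.replace.go]
  | succ f ih =>
    intro l acc h
    cases l with
    | nil => simp [PySem.Chars.replace.go]
    | cons c t =>
      rw [PySem.Chars.replace.go]
      simp only [List.isPrefixOf, List.length_cons] at *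
      by_cases hc : c = 'N'
      · subst hc
        simp [ih t _ (by omega), pvSubNA]
      · simp [ih t _ (by omega), pvSubNA, hc]
        exact fun h' => absurd h'.symm hc

lemma replace_spec (p : List Char) :
    PySem.Chars.replace p ['N'] ['A'] = p.map pvSubNA := by
  simp [PySem.Chars.replace, replace_go_spec p.length p [] le_rfl]

lemma splitOn_go_spec : ∀ fuel (l cur : List Char) (accs : List (List Char)),
    l.length < fuel →
    PySem.Chars.splitOn.go ['C','G'] fuel l cur accs
      = accs.reverse ++ pvHeadCons cur.reverse (pvSplitCG l) := by
  intro fuel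
  induction fuel with
  | zero => intro l cur accs h; omega
  | succ f ih =>
    intro l cur accs h
    cases l with
    | nil => simp [PySem.Chars.splitOn.go, pvSplitCG, pvHeadCons]
    | cons c rest =>
      rw [PySem.Chars.splitOn.go]
      by_cases hp : c = 'C' ∧ rest.head? = some 'G'
      · obtain ⟨hc, hg⟩ := hp
        subst hc
        cases rest with
        | nil => simp at hg
        | cons d t =>
          simp only [List.head?] at hg
          have hd : d = 'G' := by simpa using hg
          subst hd
          have hpre : ['C','G'].isPrefixOf ('C' :: 'G' :: t) = true := by
            simp [List.isPrefixOf]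
          simp only [hpre, if_pos]
          simp only [List.length_cons, List.length_nil, List.drop_succ_cons, List.drop_zero]
          rw [ih t [] (cur.reverse :: accs) (by simp at h; omega)]
          have hs : pvSplitCG ('C' :: 'G' :: t) = [] :: pvSplitCG t := by
            rw [pvSplitCG]; simp
          cases hq : pvSplitCG t with
          | nil => exact absurd hq (pvSplitCG_ne_nil t)
          | cons p ps => simp [hs, hq, pvHeadCons]
      · have hpre : ['C','G'].isPrefixOf (c :: rest) = false := by
          cases rest with
          | nil => simp [List.isPrefixOf]
          | cons d t =>
            simp [List.isPrefixOf]
            intro hc hd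
            exact absurd ⟨hc.symm, by simp [List.head?, hd.symm]⟩ hp
        simp only [hpre, Bool.false_eq_true, if_false]
        rw [ih rest (c :: cur) accs (by simp at h; omega)]
        have hs : pvSplitCG (c :: rest) = match pvSplitCG rest with
            | p :: ps => (c :: p) :: ps | [] => [[c]] := by
          rw [pvSplitCG]; simp [hp]
        cases hq : pvSplitCG rest with
        | nil => exact absurd hq (pvSplitCG_ne_nil rest)
        | cons p ps => simp [hs, hq, pvHeadCons]

lemma splitOn_spec (l : List Char) :
    PySem.Chars.splitOn l ['C','G'] = pvSplitCG l := by
  rw [PySem.Chars.splitOn, splitOn_go_spec (l.length + 1) l [] [] (by omega)]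
  cases hq : pvSplitCG l with
  | nil => exact absurd hq (pvSplitCG_ne_nil l)
  | cons p ps => simp [pvHeadCons]

lemma ic_cons (sep : List Char) (x : Char) (q : List Char) (qs : List (List Char)) :
    List.intercalate sep ((x :: q) :: qs) = x :: List.intercalate sep (q :: qs) := by
  cases qs <;> simp [List.intercalate, List.intersperse_cons₂]

lemma ic_cons_cons (sep q y : List Char) (ys : List (List Char)) :
    List.intercalate sep (q :: y :: ys) = q ++ sep ++ List.intercalate sep (y :: ys) := by
  simp [List.intercalate, List.intersperse_cons₂]

lemma pvMain (cpg : List Char) : ∀ n (l : List Char), l.length ≤ n →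
    PySem.Chars.join (cpg ++ ['G']) ((pvSplitCG l).map (List.map pvSubNA)) = pvALoop cpg l := by
  intro n
  induction n with
  | zero =>
    intro l h
    have : l = [] := by cases l <;> simp_all
    subst this
    simp [pvSplitCG, pvALoop, PySem.Chars.join, List.intercalate]
  | succ m ih =>
    intro l h
    cases l with
    | nil => simp [pvSplitCG, pvALoop, PySem.Chars.join, List.intercalate]
    | cons c rest =>
      by_cases hp : c = 'C' ∧ rest.head? = some 'G'
      · have hs : pvSplitCG (c :: rest) = [] :: pvSplitCG rest.tail := by
          rw [pvSplitCG]; simp [hp]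
        have ha : pvALoop cpg (c :: rest) = cpg ++ 'G' :: pvALoop cpg rest.tail := by
          rw [pvALoop]; simp [hp]
        cases hq : pvSplitCG rest.tail with
        | nil => exact absurd hq (pvSplitCG_ne_nil rest.tail)
        | cons p ps =>
          have iht := ih rest.tail (by simp [List.length_tail] at h ⊢; omega)
          rw [hq] at iht
          simp only [PySem.Chars.join] at iht ⊢
          rw [hs, hq, ha, List.map_cons, List.map_cons]
          simp only [List.map_nil]
          rw [
            ic_cons_cons (cpg ++ ['G']) [] (List.map pvSubNA p) ((ps.map (List.map pvSubNA)))]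
          rw [List.map_cons] at iht
          rw [iht]
          simp
      · have hs : pvSplitCG (c :: rest) = match pvSplitCG rest with
            | p :: ps => (c :: p) :: ps | [] => [[c]] := by
          rw [pvSplitCG]; simp [hp]
        cases hq : pvSplitCG rest with
        | nil => exact absurd hq (pvSplitCG_ne_nil rest)
        | cons p ps =>
          have iht := ih rest (by simp at h; omega)
          rw [hq] at iht
          simp only [PySem.Chars.join] at iht ⊢
          rw [hs, hq]
          simp only [List.map_cons]
          rw [ic_cons (cpg ++ ['G']) (pvSubNA c) (List.map pvSubNA p) (ps.map (List.map pvSubNA))]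
          rw [List.map_cons] at iht
          rw [iht]
          by_cases hc : c = 'N'
          · subst hc
            rw [pvALoop]; simp [pvSubNA]
          · rw [pvALoop]; simp [hp, hc, pvSubNA]

-- ===== VERDICT (by name: the statement is the Claim_ definition above) =====
theorem query_for_ref_with_cpg_bases_py_spec : Claim_equal_query_for_ref_with_cpg_bases_py := by
  intro ref_seq cpg _
  show _ = _
  unfold query_for_ref_with_cpg_bases_py query_for_ref_with_cpg_bases_py_alt
  congr 1
  have hrepl : (PySem.Chars.splitOn ref_seq.toList ['C','G']).map
      (fun p => PySem.Chars.replace p ['N'] ['A'])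
      = (pvSplitCG ref_seq.toList).map (List.map pvSubNA) := by
    rw [splitOn_spec]
    exact List.map_congr_left (fun p _ => replace_spec p)
  rw [hrepl, pvMain cpg.toList ref_seq.toList.length ref_seq.toList le_rfl]
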